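-- pv_equiv track=rewrite | github.com/Intelligent-Systems-Phystech/2020_Project_9 | code/my_sol_new_RNN_helper.py | get_p_neighbors
-- ===== SOURCE A (Python) =====
-- def get_neighbors(graph, node, from_node = None):
--     neighbors = {'this' : node, 'next' : []}
--     for edge in graph[0]:
--         if (edge[0] == node) and (edge[1] != from_node):
--             neighbors['next'].append(edge[1])
--         elif (edge[1] == node) and (edge[0] != from_node):
--             neighbors['next'].append(edge[0])
--     return neighbors
--
-- def get_p_neighbors(graph, node, p, from_node = None):
--     neighbors = get_neighbors(graph, node, from_node)
--     if p == 0: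
--         now = [[neighbors['this']]]
--     else:
--         now = []
--         for nei in neighbors['next']:
--             nextnei = get_p_neighbors(graph, nei, p - 1, node)
--             for neinei in nextnei:
--                 now.append([neighbors['this']] + neinei)
--     return now
-- ===== SOURCE B (Python) =====
-- def get_p_neighbors(graph, node, p, from_node=None):
--     # Iterative layer-by-layer expansion of partial non-backtracking paths.
--     edges = graph[0]
--     paths = [[node]]
--     for _ in range(p):
--         if not paths:
--             break
--         nxt = []
--         for path in paths:
--             last = path[-1]
--             prev = path[-2] if len(path) > 1 else from_node
--             for a, b in edges:
--                 if a == last and b != prev: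
--                     nxt.append(path + [b])
--                 elif b == last and a != prev:
--                     nxt.append(path + [a])
--         paths = nxt
--     return paths
-- ===== Notes on version B (the rewrite author's own statement) =====
-- stated objective: alternative
-- what changed: Replaces A's recursion on p (prepending the current node to every recursively enumerated suffix path) with an iterative worklist expanded layer by layer p times, each partial path extended by its last vertex's neighbors excluding the penultimate vertex.
-- outside the precondition, e.g. on get_p_neighbors([[]], 0, -1, None): A returns [], B returns [[0]]
import Mathlib
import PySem

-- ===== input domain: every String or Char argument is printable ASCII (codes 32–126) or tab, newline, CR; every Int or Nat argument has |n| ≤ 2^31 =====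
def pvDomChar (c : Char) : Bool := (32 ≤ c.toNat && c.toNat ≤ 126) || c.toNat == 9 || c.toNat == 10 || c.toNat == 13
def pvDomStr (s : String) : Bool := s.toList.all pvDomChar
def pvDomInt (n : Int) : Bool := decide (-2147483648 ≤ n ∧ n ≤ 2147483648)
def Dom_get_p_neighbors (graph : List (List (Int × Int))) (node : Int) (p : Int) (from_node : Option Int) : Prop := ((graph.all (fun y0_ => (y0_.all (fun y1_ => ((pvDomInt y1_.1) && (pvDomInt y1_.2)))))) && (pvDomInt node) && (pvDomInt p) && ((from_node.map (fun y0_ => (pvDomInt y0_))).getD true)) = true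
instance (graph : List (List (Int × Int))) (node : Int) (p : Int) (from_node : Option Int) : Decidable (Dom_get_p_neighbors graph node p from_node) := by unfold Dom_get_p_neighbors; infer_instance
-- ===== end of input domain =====

-- B replaces A's recursion on p by an iterative layer-by-layer worklist expansion (alternative decomposition, same cost).

-- ===== PORT A =====
-- get_neighbors(graph, node, from_node)['next']: scan graph[0], collecting the other endpoint
-- of each edge incident to node whose other endpoint is not from_node.
-- (graph[0] raises IndexError on graph = []; Pre_ excludes that, so the headD default is never hit.)
def pyGetNeighborsNext (edges : List (Int × Int)) (node : Int) (from_node : Option Int) : List Int :=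
  edges.foldl (fun acc e =>
    if e.1 = node ∧ some e.2 ≠ from_node then acc ++ [e.2]
    else if e.2 = node ∧ some e.1 ≠ from_node then acc ++ [e.1]
    else acc) []

-- A's recursion, on fuel = p.toNat (Pre_ restricts to 0 ≤ p, where this is exactly A's recursion on p).
def getPNfuel (graph : List (List (Int × Int))) (node : Int) (fuel : Nat) (from_node : Option Int) : List (List Int) :=
  let neis := pyGetNeighborsNext (graph.headD []) node from_node
  match fuel with
  | 0 => [[node]]
  | Nat.succ n =>
      neis.foldl (fun now nei =>
        (getPNfuel graph nei n (some node)).foldl (fun now2 neinei => now2 ++ [node :: neinei]) now) []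

def get_p_neighbors (graph : List (List (Int × Int))) (node : Int) (p : Int) (from_node : Option Int) : List (List Int) :=
  getPNfuel graph node p.toNat from_node

-- ===== PORT B =====
-- extend one partial path by every admissible neighbor of its last vertex (Source B's inner two loops)
def extendPath (edges : List (Int × Int)) (from_node : Option Int) (path : List Int) : List (List Int) :=
  let last := (PySem.List.pyGet? path (-1)).getD 0   -- path[-1]; paths are always nonempty
  let prev := if 1 < path.length then PySem.List.pyGet? path (-2) else from_node
  edges.foldl (fun acc e =>
    if e.1 = last ∧ some e.2 ≠ prev then acc ++ [path ++ [e.2]]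
    else if e.2 = last ∧ some e.1 ≠ prev then acc ++ [path ++ [e.1]]
    else acc) []

def stepPaths (edges : List (Int × Int)) (from_node : Option Int) (paths : List (List Int)) : List (List Int) :=
  paths.foldl (fun nxt path => nxt ++ extendPath edges from_node path) []

def get_p_neighbors_alt (graph : List (List (Int × Int))) (node : Int) (p : Int) (from_node : Option Int) : List (List Int) :=
  let edges := graph.headD []   -- graph[0]; Pre_ excludes graph = []
  (List.range p.toNat).foldl
    (fun paths _ => if paths.isEmpty then paths else stepPaths edges from_node paths) [[node]]

-- ===== PRECONDITION & SPEC =====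
-- Pre_ excludes graph = [] (graph[0] raises IndexError in A) and p < 0 (A recurses with p-1 forever:
-- it raises RecursionError whenever any neighbor exists, and its occasional [] on isolated nodes is an
-- accident of the missing base case; negative hop counts are outside the function's natural domain).
def Pre_get_p_neighbors (graph : List (List (Int × Int))) (node : Int) (p : Int) (from_node : Option Int) : Prop :=
  graph ≠ [] ∧ 0 ≤ p
instance (graph : List (List (Int × Int))) (node : Int) (p : Int) (from_node : Option Int) : Decidable (Pre_get_p_neighbors graph node p from_node) := by unfold Pre_get_p_neighbors; infer_instance

def pvWitness_get_p_neighbors : (List (List (Int × Int))) × Int × Int × Option Int :=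
  ([[(0, 1), (1, 2), (0, 2)]], 0, 2, none)

def Spec_get_p_neighbors (graph : List (List (Int × Int))) (node : Int) (p : Int) (from_node : Option Int) (out : List (List Int)) : Prop := out = get_p_neighbors_alt graph node p from_node
instance (graph : List (List (Int × Int))) (node : Int) (p : Int) (from_node : Option Int) (out : List (List Int)) : Decidable (Spec_get_p_neighbors graph node p from_node out) := by unfold Spec_get_p_neighbors; infer_instance

-- ===== CLAIM (what is proved, stated in full; the proofs are below) =====
def Claim_equal_get_p_neighbors : Prop := ∀ (graph : List (List (Int × Int))) (node : Int) (p : Int) (from_node : Option Int), Dom_get_p_neighbors graph node p from_node → Pre_get_p_neighbors graph node p from_node → Spec_get_p_neighbors graph node p from_node (get_p_neighbors graph node p from_node)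

-- ===== LEMMAS AND PROOFS =====

-- flatMap form of the neighbor scan
def nbrs (edges : List (Int × Int)) (v : Int) (prev : Option Int) : List Int :=
  edges.flatMap (fun e =>
    if e.1 = v ∧ some e.2 ≠ prev then [e.2]
    else if e.2 = v ∧ some e.1 ≠ prev then [e.1]
    else [])

lemma twofold_eq_nbrs_map {α : Type} (edges : List (Int × Int)) (v : Int) (prev : Option Int)
    (f : Int → α) (acc : List α) :
    edges.foldl (fun acc e =>
      if e.1 = v ∧ some e.2 ≠ prev then acc ++ [f e.2]
      else if e.2 = v ∧ some e.1 ≠ prev then acc ++ [f e.1]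
      else acc) acc = acc ++ (nbrs edges v prev).map f := by
  induction edges generalizing acc with
  | nil => simp [nbrs]
  | cons e es ih =>
      simp only [List.foldl_cons, nbrs, List.flatMap_cons] at *
      split_ifs <;> simp [ih]

lemma pyGetNeighborsNext_eq (edges : List (Int × Int)) (v : Int) (prev : Option Int) :
    pyGetNeighborsNext edges v prev = nbrs edges v prev := by
  simpa using twofold_eq_nbrs_map edges v prev id []

-- A's successor step in flatMap form
lemma getPNfuel_succ (graph : List (List (Int × Int))) (node : Int) (n : Nat) (from_node : Option Int) :
    getPNfuel graph node (n + 1) from_node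
      = (nbrs (graph.headD []) node from_node).flatMap
          (fun nei => (getPNfuel graph nei n (some node)).map (fun r => node :: r)) := by
  simp only [getPNfuel, pyGetNeighborsNext_eq]
  simp only [PySem.List.foldl_append_singleton_eq_map, PySem.List.foldl_append_eq_flatMap]
  simp [List.flatMap]

-- the penultimate vertex B uses, as a function of the path split q ++ [a]
def prevv (from_node : Option Int) (q : List Int) : Option Int :=
  if q.isEmpty then from_node else q.getLast?

lemma extendPath_concat (edges : List (Int × Int)) (from_node : Option Int) (q : List Int) (a : Int) :
    extendPath edges from_node (q ++ [a])
      = (nbrs edges a (prevv from_node q)).map (fun b => (q ++ [a]) ++ [b]) := by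
  have hlast : (PySem.List.pyGet? (q ++ [a]) (-1)).getD 0 = a := by
    simp [PySem.List.pyGet?_neg_one_append_singleton]
  have hprev : (if 1 < (q ++ [a]).length then PySem.List.pyGet? (q ++ [a]) (-2) else from_node)
      = prevv from_node q := by
    cases q with
    | nil => simp [prevv]
    | cons x xs =>
        rw [if_pos (by simp)]
        rw [PySem.List.pyGet?_neg_ofNat _ 2 (by omega) (by simp)]
        have h1 : ((x :: xs) ++ [a]).length - 2 = xs.length := by simp
        rw [h1, List.getElem?_append_left (by simp)]
        simp [prevv, List.getLast?_eq_getElem?]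
  simp only [extendPath, hlast, hprev]
  simpa using twofold_eq_nbrs_map edges a (prevv from_node q) (fun b => (q ++ [a]) ++ [b]) []

lemma stepPaths_eq_flatMap (edges : List (Int × Int)) (from_node : Option Int) (paths : List (List Int)) :
    stepPaths edges from_node paths = paths.flatMap (extendPath edges from_node) := by
  simpa [stepPaths] using
    PySem.List.foldl_append_eq_flatMap (l := paths) (g := extendPath edges from_node) (acc := [])

-- proof-side iterate form of B's range-fold
def stepIter (edges : List (Int × Int)) (from_node : Option Int) : Nat → List (List Int) → List (List Int)
  | 0, xs => xs
  | Nat.succ n, xs => stepIter edges from_node n (stepPaths edges from_node xs)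

lemma stepPaths_nil (edges : List (Int × Int)) (from_node : Option Int) :
    stepPaths edges from_node [] = [] := rfl

lemma rangeFold_eq_stepIter (edges : List (Int × Int)) (from_node : Option Int) (n : Nat) (xs : List (List Int)) :
    (List.range n).foldl
      (fun paths _ => if paths.isEmpty then paths else stepPaths edges from_node paths) xs
      = stepIter edges from_node n xs := by
  induction n generalizing xs with
  | zero => simp [stepIter]
  | succ n ih =>
      rw [List.range_succ_eq_map]
      simp only [List.foldl_cons, List.foldl_map]
      by_cases hxs : xs = []
      · subst hxs
        simpa [stepIter, stepPaths_nil] using ih []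
      · have hne : xs.isEmpty = false := by simpa using hxs
        simp only [hne, Bool.false_eq_true, if_false]
        simpa [stepIter] using ih (stepPaths edges from_node xs)

lemma stepIter_append (edges : List (Int × Int)) (from_node : Option Int) (n : Nat)
    (xs ys : List (List Int)) :
    stepIter edges from_node n (xs ++ ys)
      = stepIter edges from_node n xs ++ stepIter edges from_node n ys := by
  induction n generalizing xs ys with
  | zero => simp [stepIter]
  | succ n ih => simp [stepIter, stepPaths_eq_flatMap, ih]

lemma stepIter_nil (edges : List (Int × Int)) (from_node : Option Int) (n : Nat) :
    stepIter edges from_node n [] = [] := by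
  induction n with
  | zero => simp [stepIter]
  | succ n ih => simp [stepIter, stepPaths_eq_flatMap, ih]

lemma stepIter_map (edges : List (Int × Int)) (from_node : Option Int) (n : Nat)
    (l : List Int) (h : Int → List Int) :
    stepIter edges from_node n (l.map h)
      = l.flatMap (fun b => stepIter edges from_node n [h b]) := by
  induction l with
  | nil => simp [stepIter_nil]
  | cons b l ih =>
      have : (b :: l).map h = [h b] ++ l.map h := by simp
      rw [this, stepIter_append, ih]; simp

-- main invariant: iterating B's step n times on the single partial path q ++ [a]
-- enumerates exactly A's recursion from a with forbidden predecessor prevv, prefixed by q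
lemma main_inv (graph : List (List (Int × Int))) (from_node : Option Int) :
    ∀ (n : Nat) (q : List Int) (a : Int),
      stepIter (graph.headD []) from_node n [q ++ [a]]
        = (getPNfuel graph a n (prevv from_node q)).map (fun r => q ++ r) := by
  intro n
  induction n with
  | zero => intro q a; simp [stepIter, getPNfuel]
  | succ n ih =>
      intro q a
      have h1 : stepPaths (graph.headD []) from_node [q ++ [a]]
          = (nbrs (graph.headD []) a (prevv from_node q)).map (fun b => (q ++ [a]) ++ [b]) := by
        simp [stepPaths_eq_flatMap, extendPath_concat]
      rw [stepIter, h1, stepIter_map, getPNfuel_succ]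
      have hprev : prevv from_node (q ++ [a]) = some a := by
        simp [prevv]
      calc (nbrs (graph.headD []) a (prevv from_node q)).flatMap
              (fun b => stepIter (graph.headD []) from_node n [(q ++ [a]) ++ [b]])
          = (nbrs (graph.headD []) a (prevv from_node q)).flatMap
              (fun b => (getPNfuel graph b n (some a)).map (fun r => (q ++ [a]) ++ r)) := by
            simp only [ih, hprev]
        _ = ((nbrs (graph.headD []) a (prevv from_node q)).flatMap
              (fun nei => (getPNfuel graph nei n (some a)).map (fun r => a :: r))).map
              (fun r => q ++ r) := by
            simp [List.map_flatMap, Function.comp_def]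

-- ===== VERDICT (by name: the statement is the Claim_ definition above) =====
theorem get_p_neighbors_spec : Claim_equal_get_p_neighbors := by
  intro graph node p from_node _hdom hpre
  obtain ⟨hg, hp⟩ := hpre
  unfold Spec_get_p_neighbors get_p_neighbors get_p_neighbors_alt
  rw [rangeFold_eq_stepIter]
  have := main_inv graph from_node p.toNat [] node
  simp only [List.nil_append] at this
  rw [this]
  simp [prevv]
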